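-- pv_equiv track=rewrite | github.com/JackCompass/CompetitiveCode | Disarium_num.py | Disarium
-- ===== SOURCE A (Python) =====
-- def Disarium( num ):
-- 	total = 0
--
-- 	# Calculating the digits in the user num.
-- 	no_of_digits = int(len(str(num)))
--
--
-- 	while ( num > 0) :
-- 		rem = num % 10
-- 		num = int(num / 10)
-- 		total = total + pow(rem,no_of_digits)
-- 		no_of_digits -= 1
--
-- 	return total
-- ===== SOURCE B (Python) =====
-- def Disarium(num):
--     if num <= 0:
--         return 0
--     return sum(int(d) ** (i + 1) for i, d in enumerate(str(num)))
-- ===== Notes on version B (the rewrite author's own statement) =====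
-- stated objective: idiomatic
-- what changed: B replaces A's while-loop of repeated modulus/truncating-division steps with a decreasing precomputed exponent by a single left-to-right pass over enumerate(str(num)), taking each digit's exponent directly from its index.
import Mathlib
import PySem

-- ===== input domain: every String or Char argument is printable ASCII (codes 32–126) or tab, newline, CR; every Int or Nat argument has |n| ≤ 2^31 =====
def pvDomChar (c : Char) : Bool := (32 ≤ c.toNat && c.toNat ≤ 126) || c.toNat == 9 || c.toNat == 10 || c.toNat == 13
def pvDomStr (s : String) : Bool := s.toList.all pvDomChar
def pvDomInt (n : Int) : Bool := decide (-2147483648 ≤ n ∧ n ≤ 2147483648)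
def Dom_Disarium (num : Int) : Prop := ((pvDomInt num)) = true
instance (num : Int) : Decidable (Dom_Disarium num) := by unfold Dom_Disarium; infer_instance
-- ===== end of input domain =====

-- B changes A's divmod while-loop with a decreasing precomputed exponent into a single
-- left-to-right pass over enumerate(str(num)) (idiomatic; same cost).

-- ===== PORT A =====
-- while (num > 0): rem = num % 10; num = int(num / 10); total += pow(rem, no_of_digits); no_of_digits -= 1
-- int(num / 10) is truncating division (PySem.Int.truncdiv, exact on the domain's |num| ≤ 2^31);
-- pow's exponent is ≥ 1 whenever the loop body runs, so '^ nod.toNat' is exact there.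
def DisariumLoop (num nod total : Int) : Int :=
  if 0 < num then
    DisariumLoop (PySem.Int.truncdiv num 10) (nod - 1)
      (total + (PySem.Int.mod num 10) ^ nod.toNat)
  else total
termination_by num.toNat
decreasing_by
  rename_i h
  simp only [PySem.Int.truncdiv]
  rw [Int.tdiv_eq_ediv_of_nonneg (by omega)]
  omega

def Disarium (num : Int) : Int :=
  DisariumLoop num (PySem.Str.len (PySem.Int.toStr num)) 0

-- ===== PORT B =====
-- if num <= 0: return 0; sum(int(d) ** (i+1) for i, d in enumerate(str(num)))
def Disarium_alt (num : Int) : Int :=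
  if num ≤ 0 then 0
  else
    (PySem.List.enumerate (PySem.Int.toStr num).toList 0).foldl
      (fun acc p => acc + ((PySem.Int.ofChars? [p.2]).getD 0) ^ (p.1 + 1).toNat) 0

-- ===== PRECONDITION & SPEC =====
def Spec_Disarium (num : Int) (out : Int) : Prop := out = Disarium_alt num
instance (num : Int) (out : Int) : Decidable (Spec_Disarium num out) := by unfold Spec_Disarium; infer_instance

-- ===== CLAIM (what is proved, stated in full; the proofs are below) =====
def Claim_equal_Disarium : Prop := ∀ (num : Int), Dom_Disarium num → Spec_Disarium num (Disarium num)

-- ===== LEMMAS AND PROOFS =====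

-- common value: digit powers over the LSB-first digit list, head exponent e, decreasing
def gsum : List Nat → Int → Int
  | [], _ => 0
  | d :: ds, e => (d : Int) ^ e.toNat + gsum ds (e - 1)

lemma loop_eq (m : Nat) : ∀ (e t : Int),
    DisariumLoop (m : Int) e t = t + gsum (Nat.digits 10 m) e := by
  induction m using Nat.strong_induction_on with
  | _ m ih =>
    intro e t
    rcases Nat.eq_zero_or_pos m with hm | hm
    · subst hm
      rw [DisariumLoop.eq_def]
      simp [gsum]
    · rw [DisariumLoop.eq_def]
      have h0 : (0 : Int) < (m : Int) := by exact_mod_cast hm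
      rw [if_pos h0]
      have hdiv : PySem.Int.truncdiv (m : Int) 10 = ((m / 10 : Nat) : Int) := by
        simp [PySem.Int.truncdiv, Int.tdiv]
      have hmod : PySem.Int.mod (m : Int) 10 = ((m % 10 : Nat) : Int) := by
        have h1 : PySem.Int.mod (m : Int) 10 = (m : Int) % 10 := by
          simp [PySem.Int.mod, Int.fmod_eq_emod]
        omega
      rw [hdiv, hmod, ih (m / 10) (Nat.div_lt_self hm (by norm_num))]
      rw [Nat.digits_def' (by norm_num : 1 < 10) hm]
      simp [gsum]
      ring

lemma digitChar_val (d : Nat) (hd : d < 10) :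
    (PySem.Int.ofChars? [Nat.digitChar d]).getD 0 = (d : Int) := by
  interval_cases d <;> decide

lemma bfold_eq (ds : List Nat) (hds : ∀ d ∈ ds, d < 10) :
    (PySem.List.enumerate ((ds.map Nat.digitChar).reverse) 0).foldl
      (fun acc p => acc + ((PySem.Int.ofChars? [p.2]).getD 0) ^ (p.1 + 1).toNat) 0
    = gsum ds (ds.length : Int) := by
  induction ds with
  | nil => simp [gsum]
  | cons d ds ih =>
    have hrev : ((d :: ds).map Nat.digitChar).reverse
        = (ds.map Nat.digitChar).reverse ++ [Nat.digitChar d] := by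
      simp
    rw [hrev, PySem.List.enumerate_append]
    rw [List.foldl_append]
    rw [ih (fun x hx => hds x (List.mem_cons_of_mem _ hx))]
    have hlen : ((ds.map Nat.digitChar).reverse.length : Int) = (ds.length : Int) := by simp
    simp only [hlen, PySem.List.enumerate, List.foldl]
    rw [digitChar_val d (hds d (List.mem_cons_self))]
    have h1 : ((0 : Int) + (ds.length : Int) + 1).toNat = ds.length + 1 := by omega
    rw [h1]
    simp [gsum]
    ring

lemma toDigitsCore_succ (fuel n : Nat) (cs : List Char) :
    Nat.toDigitsCore 10 (fuel + 1) n cs =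
      (if n / 10 = 0 then (n % 10).digitChar :: cs
       else Nat.toDigitsCore 10 fuel (n / 10) ((n % 10).digitChar :: cs)) := by
  rw [Nat.toDigitsCore.eq_def]

lemma toDigitsCore_eq : ∀ (fuel n : Nat) (cs : List Char), 0 < n → n < fuel →
    Nat.toDigitsCore 10 fuel n cs = ((Nat.digits 10 n).map Nat.digitChar).reverse ++ cs := by
  intro fuel
  induction fuel with
  | zero => intro n cs _ h; omega
  | succ fuel ih =>
    intro n cs hn hf
    rw [toDigitsCore_succ]
    rw [Nat.digits_def' (by norm_num : 1 < 10) hn]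
    by_cases h10 : n / 10 = 0
    · rw [if_pos h10, h10]
      simp
    · rw [if_neg h10]
      rw [ih (n / 10) ((n % 10).digitChar :: cs) (Nat.pos_of_ne_zero h10)
        (by have := Nat.div_lt_self hn (by norm_num : 1 < 10); omega)]
      simp

lemma toChars_pos (n : Int) (hn : 0 < n) :
    PySem.Int.toChars n = ((Nat.digits 10 n.toNat).map Nat.digitChar).reverse := by
  rw [PySem.Int.toChars]
  rw [if_neg (by omega)]
  rw [Nat.toDigits]
  rw [toDigitsCore_eq (n.toNat + 1) n.toNat [] (by omega) (by omega)]
  simp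

lemma digits_lt (n : Nat) : ∀ d ∈ Nat.digits 10 n, d < 10 := by
  intro d hd
  exact Nat.digits_lt_base (by norm_num) hd

-- ===== VERDICT (by name: the statement is the Claim_ definition above) =====
theorem Disarium_spec : Claim_equal_Disarium := by
  intro num _
  unfold Spec_Disarium Disarium Disarium_alt
  by_cases hpos : 0 < num
  · rw [if_neg (by omega)]
    have hchars := toChars_pos num hpos
    have hnum : num = ((num.toNat : Nat) : Int) := by omega
    rw [PySem.Int.toList_toStr, hchars]
    rw [bfold_eq (Nat.digits 10 num.toNat) (digits_lt num.toNat)]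
    have hlen : PySem.Str.len (PySem.Int.toStr num)
        = ((Nat.digits 10 num.toNat).length : Int) := by
      rw [PySem.Str.len, PySem.Int.toList_toStr, hchars]; simp
    rw [hlen]
    calc DisariumLoop num ((Nat.digits 10 num.toNat).length : Int) 0
        = DisariumLoop ((num.toNat : Nat) : Int) ((Nat.digits 10 num.toNat).length : Int) 0 := by
          rw [← hnum]
      _ = gsum (Nat.digits 10 num.toNat) ((Nat.digits 10 num.toNat).length : Int) := by
          rw [loop_eq]; ring
  · rw [if_pos (by omega)]
    rw [DisariumLoop, if_neg hpos]
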